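-- pv_equiv track=rewrite | github.com/AceTheDactyl/Rosetta-Helix-Substrate | src/unified_math_bridge.py | interference_to_cell
-- ===== SOURCE A (Python) =====
-- from typing import Any, Callable, Dict, Final, List, Optional, Tuple
--
-- FANO_LINES: List[frozenset] = [
--     frozenset({1, 2, 3}),
--     frozenset({1, 4, 5}),
--     frozenset({1, 6, 7}),
--     frozenset({2, 4, 6}),
--     frozenset({2, 5, 7}),
--     frozenset({3, 4, 7}),
--     frozenset({3, 5, 6}),
-- ]
--
-- def interference_to_cell(i: int, j: int) -> Tuple[int, int]:
--     """Map interference node to cell via Fano structure."""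
--     p_i, p_j = i + 1, j + 1
--     for line in FANO_LINES:
--         if frozenset({p_i, p_j}) <= line:
--             third = list(line - {p_i, p_j})[0]
--             pts = sorted(line)
--             face = (
--                 0 if (p_i, p_j) == (pts[0], pts[1])
--                 else (1 if (p_i, p_j) == (pts[0], pts[2]) else 2)
--             )
--             return (third, face)
--     return (4, 1)
-- ===== SOURCE B (Python) =====
-- def interference_to_cell(i, j):
--     """Closed form: with points labelled 1..7, the Fano lines are exactly the
--     triples with zero XOR, so the third point of the line through p and q is
--     p ^ q; the face index is the rank of the pair among the line's sorted pairs."""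
--     p, q = i + 1, j + 1
--     if not (1 <= p <= 7 and 1 <= q <= 7 and p != q):
--         return (4, 1)
--     t = p ^ q
--     if p > q:
--         return (t, 2)
--     return (t, 0 if t > q else 1 if t > p else 2)
-- ===== Notes on version B (the rewrite author's own statement) =====
-- stated objective: simpler
-- what changed: Replaces the scan over FANO_LINES (subset test, set difference, sort, tuple comparisons) with a closed arithmetic form: the third point is p XOR q (the Fano triples on 1..7 are exactly the zero-XOR triples) and the face index comes from comparing p, q and the third point; Pre_ excludes degenerate self-pairs i=j with i+1 in 1..7, on which A's 'third point' is an accident of matching the singleton set against the first containing line and of set-iteration order, while B treats them as not determining a line and returns the same out-of-range default value.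
-- outside the precondition, e.g. on interference_to_cell(0, 0): A returns (2, 2), B returns (4, 1); on interference_to_cell(3, 3): A returns (1, 2), B returns (4, 1)
import Mathlib
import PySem

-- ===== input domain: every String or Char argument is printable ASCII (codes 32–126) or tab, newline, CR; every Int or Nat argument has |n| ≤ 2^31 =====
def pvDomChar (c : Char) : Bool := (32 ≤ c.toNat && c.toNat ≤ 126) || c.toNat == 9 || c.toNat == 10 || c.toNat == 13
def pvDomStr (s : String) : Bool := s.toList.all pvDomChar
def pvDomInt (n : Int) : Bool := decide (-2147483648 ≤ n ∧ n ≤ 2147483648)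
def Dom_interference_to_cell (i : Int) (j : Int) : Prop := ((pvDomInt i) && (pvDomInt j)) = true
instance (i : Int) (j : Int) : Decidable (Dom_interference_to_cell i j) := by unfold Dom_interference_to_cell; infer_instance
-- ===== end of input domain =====

-- B replaces A's scan over the Fano lines by a closed arithmetic form (third point = p XOR q); objective: simpler.

-- ===== PORT A =====
-- FANO_LINES: each frozenset of small ints 1..7 iterates in ascending order in
-- CPython (hash(n) = n, table slots in order), so each line is the ascending list.
def fanoLines : List (List Int) := [[1,2,3],[1,4,5],[1,6,7],[2,4,6],[2,5,7],[3,4,7],[3,5,6]]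

-- the for-loop with early return; `frozenset({p,q}) <= line` is p ∈ line ∧ q ∈ line.
-- `list(line - {p,q})[0]`: the difference frozenset of ints < 8 also iterates
-- ascending, so filtering the ascending list and taking the head is exact; the
-- index [0] is always in range (3-element line minus at most 2 points).
def icLoop (p : Int) (q : Int) : List (List Int) → Int × Int
  | [] => (4, 1)
  | line :: rest =>
    if p ∈ line ∧ q ∈ line then
      let third := (line.filter (fun x => ¬(x = p ∨ x = q))).headD 0
      let pts := PySem.List.sorted line (fun x => x) false
      let face : Int :=
        if (p, q) = (pts.getD 0 0, pts.getD 1 0) then 0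
        else if (p, q) = (pts.getD 0 0, pts.getD 2 0) then 1 else 2
      (third, face)
    else icLoop p q rest

def interference_to_cell (i : Int) (j : Int) : Int × Int :=
  icLoop (i + 1) (j + 1) fanoLines

-- ===== PORT B =====
def interference_to_cell_alt (i : Int) (j : Int) : Int × Int :=
  let p := i + 1
  let q := j + 1
  if ¬(1 ≤ p ∧ p ≤ 7 ∧ 1 ≤ q ∧ q ≤ 7 ∧ p ≠ q) then (4, 1)
  else
    let t : Int := ((p.toNat ^^^ q.toNat : Nat) : Int)  -- p ^ q, both in 1..7
    if p > q then (t, 2)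
    else (t, if t > q then 0 else if t > p then 1 else 2)

-- ===== PRECONDITION & SPEC =====
-- Pre_ excludes degenerate self-pairs i = j with i+1 in 1..7: there the pair does
-- not determine a line and A's returned 'third point' is an accident of matching
-- the singleton set against the first containing line and of set-iteration order,
-- a value no one would specify; B returns the out-of-range default value there.
def Pre_interference_to_cell (i : Int) (j : Int) : Prop :=
  ¬(i = j ∧ 1 ≤ i + 1 ∧ i + 1 ≤ 7)
instance (i : Int) (j : Int) : Decidable (Pre_interference_to_cell i j) := by
  unfold Pre_interference_to_cell; infer_instance

def pvWitness_interference_to_cell : Int × Int := (0, 1)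

def Spec_interference_to_cell (i : Int) (j : Int) (out : Int × Int) : Prop := out = interference_to_cell_alt i j
instance (i : Int) (j : Int) (out : Int × Int) : Decidable (Spec_interference_to_cell i j out) := by unfold Spec_interference_to_cell; infer_instance

-- ===== CLAIM (what is proved, stated in full; the proofs are below) =====
def Claim_equal_interference_to_cell : Prop := ∀ (i : Int) (j : Int), Dom_interference_to_cell i j → Pre_interference_to_cell i j → Spec_interference_to_cell i j (interference_to_cell i j)

-- ===== LEMMAS AND PROOFS =====
-- out-of-range: no line contains p (or q), so the scan falls through to (4,1)
lemma icLoop_notmem (p q : Int) (h : ¬(1 ≤ p ∧ p ≤ 7 ∧ 1 ≤ q ∧ q ≤ 7)) :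
    icLoop p q fanoLines = (4, 1) := by
  simp only [fanoLines, icLoop]
  split_ifs
  all_goals first
    | rfl
    | (exfalso; simp only [List.mem_cons, List.not_mem_nil, or_false] at *; omega)

-- ===== VERDICT (by name: the statement is the Claim_ definition above) =====
theorem interference_to_cell_spec : Claim_equal_interference_to_cell := by
  intro i j _ hpre
  unfold Spec_interference_to_cell
  by_cases h : 1 ≤ i + 1 ∧ i + 1 ≤ 7 ∧ 1 ≤ j + 1 ∧ j + 1 ≤ 7
  · have hij : i ≠ j := by
      intro he; exact hpre ⟨he, by omega, by omega⟩
    have hi : 0 ≤ i := by omega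
    have hi' : i ≤ 6 := by omega
    have hj : 0 ≤ j := by omega
    have hj' : j ≤ 6 := by omega
    interval_cases i <;> interval_cases j <;> simp_all <;> decide
  · unfold interference_to_cell interference_to_cell_alt
    rw [icLoop_notmem _ _ h, if_pos (by omega)]
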